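-- pv_equiv track=rewrite | github.com/hanaliraa/nlp-spelling-dysign | spell_check.py | sim_characters
-- ===== SOURCE A (Python) =====
-- sim_con = {
--     'b': ['d','h','q','p'],
--     'd': ['b', 'h', 'q','p'],
--     'h': ['b', 'd', 'q', 'p'],
--     'q': ['b', 'd', 'h', 'p'],
--     'p': ['b', 'd', 'h', 'q'],
--     'f': ['t'],
--     't': ['f'],
-- }
--
-- sim_vow = {
--     'o': ['u', 'e'],
--     'i': ['e'],
--     'a': ['e'],
--     'e': ['i', 'a', 'u']
-- }
--
-- consonants = ['b', 'c', 'd', 'f', 'g', 'h', 'j', 'k', 'l', 'm', 'n', 'p', 'q', 'r', 's', 't', 'v', 'w', 'x', 'y', 'z']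
--
-- def sim_characters(src, tgt):
--     score = []
--     phe = 0
--     unv = 0
--     aee = 0
--     doc = 0
--
--     # if length of src and tgt is same but the error is in character
--     if len(src) == len(tgt):
--         for c in range(len(src)):
--
--             if src[c] != tgt[c]:
--                 # phonetic error [6]
--                 if src[c] in sim_con.keys() and tgt[c] in sim_con[src[c]]: phe += 1
--
--                 #unstressed vowel [10]
--                 elif src[c] in sim_vow.keys() and tgt[c] in sim_vow[src[c]]: unv += 1
--
--     # if length of tgt is greater, meaning the child has written extra character
--     elif len(src) < len(tgt):
--
--         prev_c = ''
--         for c in range(len(tgt)):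
--
--             # adding extra e [1]
--             if c == len(tgt) - 1:
--                 if tgt[-1] == 'e' and src[-1] != 'e': aee += 1
--
--             if c < len(src):
--                 #phonetic error [6]
--                 if src[c] in sim_con.keys() and tgt[c] in sim_con[src[c]]: phe += 1
--
--                 #doubling of consonants [3]
--                 if src[c] != tgt[c] and tgt[c] == prev_c and tgt[c] in consonants: doc += 1
--                 elif src[c] == tgt[c]: prev_c = src[c]
--
--     return phe, unv, aee, doc
-- ===== SOURCE B (Python) =====
-- # B: pair-set classification + stateless backward search for doc (no carried prev state)
-- SIM_CON_PAIRS = {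
--     ('b','d'),('b','h'),('b','q'),('b','p'),
--     ('d','b'),('d','h'),('d','q'),('d','p'),
--     ('h','b'),('h','d'),('h','q'),('h','p'),
--     ('q','b'),('q','d'),('q','h'),('q','p'),
--     ('p','b'),('p','d'),('p','h'),('p','q'),
--     ('f','t'),('t','f'),
-- }
-- SIM_VOW_PAIRS = {('o','u'),('o','e'),('i','e'),('a','e'),('e','i'),('e','a'),('e','u')}
-- CONSONANT_SET = set('bcdfghjklmnpqrstvwxyz')
--
-- def _prev_match(pairs, c):
--     # last char x such that src[j] == tgt[j] == x at some j < c (None if no such j)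
--     for a, b in reversed(pairs[:c]):
--         if a == b:
--             return a
--     return None
--
-- def sim_characters(src, tgt):
--     if len(src) == len(tgt):
--         pairs = list(zip(src, tgt))
--         return (sum(p in SIM_CON_PAIRS for p in pairs),
--                 sum(p in SIM_VOW_PAIRS for p in pairs), 0, 0)
--     if len(src) < len(tgt):
--         aee = 1 if tgt[-1] == 'e' and src[-1] != 'e' else 0
--         pairs = list(zip(src, tgt))
--         phe = sum(p in SIM_CON_PAIRS for p in pairs)
--         doc = 0
--         for c in range(len(pairs)):
--             a, b = pairs[c]
--             if a != b and b in CONSONANT_SET and _prev_match(pairs, c) == b: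
--                 doc += 1
--         return phe, 0, aee, doc
--     return (0, 0, 0, 0)
-- ===== Notes on version B (the rewrite author's own statement) =====
-- stated objective: alternative
-- what changed: A carries mutable loop state (combined counters and a prev_c variable threaded through one index loop per length-case); B is stateless: mismatches are classified by membership of the (src,tgt) character pair in precomputed pair-sets (no inequality/elif chain needed), and the doubling counter replaces A's carried prev_c by an independent per-position backward search for the last matching position, so each of the four counters is a pure count with no loop-carried dependence.
import Mathlib
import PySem

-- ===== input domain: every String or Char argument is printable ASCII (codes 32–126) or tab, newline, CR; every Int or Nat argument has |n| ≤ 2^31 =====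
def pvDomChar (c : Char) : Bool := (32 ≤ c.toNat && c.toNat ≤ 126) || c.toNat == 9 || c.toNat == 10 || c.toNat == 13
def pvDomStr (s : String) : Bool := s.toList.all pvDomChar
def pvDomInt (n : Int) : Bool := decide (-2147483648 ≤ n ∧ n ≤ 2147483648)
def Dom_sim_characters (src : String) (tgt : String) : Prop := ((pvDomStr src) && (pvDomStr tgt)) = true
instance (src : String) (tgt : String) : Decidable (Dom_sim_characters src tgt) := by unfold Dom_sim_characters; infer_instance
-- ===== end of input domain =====

-- B replaces A's loop-carried state by stateless counting: mismatches are classified by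
-- membership of the character pair in precomputed pair-sets, and the doubling counter
-- replaces A's carried prev_c by a per-position backward search; objective: alternative.

-- ===== PORT A =====
-- literal port of A: one index loop per branch; state in the second branch is
-- (phe, aee, doc, prev_c) with prev_c : Option Char, none ↔ Python's initial ''.
-- src[-1] / tgt[-1] are PySem.Str.pyGet? (the ' ' default is only reached outside Pre_,
-- where Python raises).  Loop bodies are the named step helpers below, one per loop.

-- A's module constants sim_con / sim_vow as lookup-with-default-[] and consonants
def simCon (a : Char) : List Char :=
  if a = 'b' then ['d','h','q','p']
  else if a = 'd' then ['b','h','q','p']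
  else if a = 'h' then ['b','d','q','p']
  else if a = 'q' then ['b','d','h','p']
  else if a = 'p' then ['b','d','h','q']
  else if a = 'f' then ['t']
  else if a = 't' then ['f']
  else []

def simVow (a : Char) : List Char :=
  if a = 'o' then ['u','e']
  else if a = 'i' then ['e']
  else if a = 'a' then ['e']
  else if a = 'e' then ['i','a','u']
  else []

def consonantsL : List Char :=
  ['b','c','d','f','g','h','j','k','l','m','n','p','q','r','s','t','v','w','x','y','z']

-- body of the `c < len(src)` block of A's second loop
def stepAIn (s t : List Char) (st : Int × Int × Int × Option Char) (c : Nat) :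
    Int × Int × Int × Option Char :=
  let st := if t.getD c ' ' ∈ simCon (s.getD c ' ') then (st.1 + 1, st.2) else st
  if s.getD c ' ' ≠ t.getD c ' ' ∧ some (t.getD c ' ') = st.2.2.2 ∧ t.getD c ' ' ∈ consonantsL
    then (st.1, st.2.1, st.2.2.1 + 1, st.2.2.2)
  else if s.getD c ' ' = t.getD c ' ' then (st.1, st.2.1, st.2.2.1, some (s.getD c ' '))
  else st

-- one iteration of A's second loop
def stepA2 (src tgt : String) (st : Int × Int × Int × Option Char) (c : Nat) :
    Int × Int × Int × Option Char :=
  let st := if c = tgt.toList.length - 1 then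
      (if (PySem.Str.pyGet? tgt (-1)).getD ' ' = 'e' ∧ (PySem.Str.pyGet? src (-1)).getD ' ' ≠ 'e'
       then (st.1, st.2.1 + 1, st.2.2) else st)
    else st
  if c < src.toList.length then stepAIn src.toList tgt.toList st c else st

-- one iteration of A's first (equal-length) loop
def stepAEq (s t : List Char) (st : Int × Int) (c : Nat) : Int × Int :=
  if s.getD c ' ' ≠ t.getD c ' ' then
    if t.getD c ' ' ∈ simCon (s.getD c ' ') then (st.1 + 1, st.2)
    else if t.getD c ' ' ∈ simVow (s.getD c ' ') then (st.1, st.2 + 1)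
    else st
  else st

def sim_characters (src : String) (tgt : String) : Int × Int × Int × Int :=
  let s := src.toList
  let t := tgt.toList
  if s.length = t.length then
    let r := (List.range s.length).foldl (stepAEq s t) (0, 0)
    (r.1, r.2, 0, 0)
  else if s.length < t.length then
    let r := (List.range t.length).foldl (stepA2 src tgt) (0, 0, 0, none)
    (r.1, 0, r.2.1, r.2.2.1)
  else (0, 0, 0, 0)

-- ===== PORT B =====
-- literal port of Source B: SIM_CON_PAIRS / SIM_VOW_PAIRS / CONSONANT_SET as the same
-- collections of literals (membership only), _prev_match as the backward find over
-- the reversed prefix, and each counter as its own pure count.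

def pairSetCon : List (Char × Char) :=
  [('b','d'),('b','h'),('b','q'),('b','p'),
   ('d','b'),('d','h'),('d','q'),('d','p'),
   ('h','b'),('h','d'),('h','q'),('h','p'),
   ('q','b'),('q','d'),('q','h'),('q','p'),
   ('p','b'),('p','d'),('p','h'),('p','q'),
   ('f','t'),('t','f')]

def pairSetVow : List (Char × Char) :=
  [('o','u'),('o','e'),('i','e'),('a','e'),('e','i'),('e','a'),('e','u')]

-- _prev_match(pairs, c): first a==b pair of reversed(pairs[:c]), its char; None if absent
def prevMatch (pairs : List (Char × Char)) (c : Nat) : Option Char :=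
  ((pairs.take c).reverse.find? (fun p => p.1 == p.2)).map Prod.fst

def sim_characters_alt (src : String) (tgt : String) : Int × Int × Int × Int :=
  let s := src.toList
  let t := tgt.toList
  if s.length = t.length then
    let pairs := s.zip t
    ((pairs.countP (fun p => decide (p ∈ pairSetCon)) : Nat),
     (pairs.countP (fun p => decide (p ∈ pairSetVow)) : Nat), 0, 0)
  else if s.length < t.length then
    let aee : Int :=
      if (PySem.Str.pyGet? tgt (-1)).getD ' ' = 'e' ∧ (PySem.Str.pyGet? src (-1)).getD ' ' ≠ 'e'
      then 1 else 0
    let pairs := s.zip t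
    let phe : Int := (pairs.countP (fun p => decide (p ∈ pairSetCon)) : Nat)
    let doc : Int := ((List.range pairs.length).countP (fun c =>
        let p := pairs.getD c (' ', ' ')
        decide (p.1 ≠ p.2 ∧ p.2 ∈ consonantsL ∧ prevMatch pairs c = some p.2)) : Nat)
    (phe, 0, aee, doc)
  else (0, 0, 0, 0)

-- ===== PRECONDITION & SPEC =====
-- Pre_ excludes exactly the inputs where A raises IndexError (src empty while tgt is
-- longer and ends in 'e', so the short-circuited `src[-1]` is evaluated); B raises there too.
def Pre_sim_characters (src : String) (tgt : String) : Prop :=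
  ¬ (src = "" ∧ tgt.toList.getLast? = some 'e')
instance (src : String) (tgt : String) : Decidable (Pre_sim_characters src tgt) := by
  unfold Pre_sim_characters; infer_instance

def pvWitness_sim_characters : String × String := ("cat", "late")

def Spec_sim_characters (src : String) (tgt : String) (out : Int × Int × Int × Int) : Prop := out = sim_characters_alt src tgt
instance (src : String) (tgt : String) (out : Int × Int × Int × Int) : Decidable (Spec_sim_characters src tgt out) := by unfold Spec_sim_characters; infer_instance

-- ===== CLAIM (what is proved, stated in full; the proofs are below) =====
def Claim_equal_sim_characters : Prop := ∀ (src : String) (tgt : String), Dom_sim_characters src tgt → Pre_sim_characters src tgt → Spec_sim_characters src tgt (sim_characters src tgt)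

-- ===== LEMMAS AND PROOFS =====

-- membership in A's per-key lists is membership in B's pair sets
theorem mem_con (a b : Char) : b ∈ simCon a ↔ (a, b) ∈ pairSetCon := by
  unfold simCon pairSetCon
  split_ifs <;> subst_vars <;> simp [Prod.ext_iff] <;> tauto

theorem mem_vow (a b : Char) : b ∈ simVow a ↔ (a, b) ∈ pairSetVow := by
  unfold simVow pairSetVow
  split_ifs <;> subst_vars <;> simp [Prod.ext_iff] <;> tauto

theorem not_self_con (a : Char) : (a, a) ∉ pairSetCon := by
  intro h
  rw [← mem_con] at h
  unfold simCon at h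
  split_ifs at h <;> simp_all

theorem not_self_vow (a : Char) : (a, a) ∉ pairSetVow := by
  intro h
  rw [← mem_vow] at h
  unfold simVow at h
  split_ifs at h <;> simp_all

-- a fold over `range s.length` reading s[c], t[c] is the fold over `s.zip t` (s no longer than t)
theorem foldl_range_zip {α : Type} (f : α → Char → Char → α) :
    ∀ (s t : List Char) (st : α), s.length ≤ t.length →
    (List.range s.length).foldl (fun st c => f st (s.getD c ' ') (t.getD c ' ')) st
      = (s.zip t).foldl (fun st p => f st p.1 p.2) st := by
  intro s
  induction s with
  | nil => intro t st h; simp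
  | cons a s ih =>
    intro t st h
    match t with
    | [] => simp at h
    | b :: t =>
      rw [List.length_cons, List.range_succ_eq_map]
      simp only [List.foldl_cons, List.foldl_map, List.getD_cons_zero, List.getD_cons_succ,
        List.zip_cons_cons]
      exact ih t (f st a b) (by simpa using h)

-- A's equal-length step in zip form
def stepEqZ (st : Int × Int) (p : Char × Char) : Int × Int :=
  if p.1 ≠ p.2 then
    if p.2 ∈ simCon p.1 then (st.1 + 1, st.2)
    else if p.2 ∈ simVow p.1 then (st.1, st.2 + 1)
    else st
  else st

-- A's doc/prev update in zip form
def stepDoc (st : Int × Option Char) (p : Char × Char) : Int × Option Char :=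
  if p.1 ≠ p.2 ∧ some p.2 = st.2 ∧ p.2 ∈ consonantsL then (st.1 + 1, st.2)
  else if p.1 = p.2 then (st.1, some p.1)
  else st

-- the combined zip-step of A's common-prefix work (phe bump then doc/prev update)
def stepZip (st : Int × Int × Int × Option Char) (p : Char × Char) :
    Int × Int × Int × Option Char :=
  let st := if p.2 ∈ simCon p.1 then (st.1 + 1, st.2) else st
  if p.1 ≠ p.2 ∧ some p.2 = st.2.2.2 ∧ p.2 ∈ consonantsL then (st.1, st.2.1, st.2.2.1 + 1, st.2.2.2)
  else if p.1 = p.2 then (st.1, st.2.1, st.2.2.1, some p.1)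
  else st

-- A's combined prefix step splits into the phe count and the doc/prev scan
theorem split_prefix :
    ∀ (l : List (Char × Char)) (phe aee doc : Int) (prev : Option Char),
    l.foldl stepZip (phe, aee, doc, prev)
      = (phe + ((l.countP (fun p => decide (p.2 ∈ simCon p.1)) : Nat) : Int), aee,
         (l.foldl stepDoc (doc, prev)).1, (l.foldl stepDoc (doc, prev)).2) := by
  intro l
  induction l with
  | nil => intro phe aee doc prev; simp
  | cons p l ih =>
    intro phe aee doc prev
    rw [List.foldl_cons, List.foldl_cons, List.countP_cons]
    simp only [stepZip, stepDoc]
    split_ifs <;> rw [ih] <;> simp <;> first | omega | simp_all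

-- A's equal-length index loop in zip form
theorem eq_loop (s t : List Char) (h : s.length ≤ t.length) (st : Int × Int) :
    (List.range s.length).foldl (stepAEq s t) st = (s.zip t).foldl stepEqZ st := by
  exact foldl_range_zip (f := fun st a b =>
    if a ≠ b then
      (if b ∈ simCon a then (st.1 + 1, st.2)
       else if b ∈ simVow a then (st.1, st.2 + 1) else st)
    else st) s t st h

-- A's inner prefix step, index form → zip form
theorem in_loop (s t : List Char) (h : s.length ≤ t.length) (st : Int × Int × Int × Option Char) :
    (List.range s.length).foldl (stepAIn s t) st = (s.zip t).foldl stepZip st := by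
  exact foldl_range_zip (f := fun st a b =>
    (fun (st : Int × Int × Int × Option Char) (p : Char × Char) =>
      let st := if p.2 ∈ simCon p.1 then (st.1 + 1, st.2) else st
      if p.1 ≠ p.2 ∧ some p.2 = st.2.2.2 ∧ p.2 ∈ consonantsL then (st.1, st.2.1, st.2.2.1 + 1, st.2.2.2)
      else if p.1 = p.2 then (st.1, st.2.1, st.2.2.1, some p.1)
      else st) st (a, b)) s t st h

-- A's equal-length zip fold is B's two pair-set counts
theorem eq_split : ∀ (l : List (Char × Char)) (phe unv : Int),
    l.foldl stepEqZ (phe, unv)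
      = (phe + ((l.countP (fun p => decide (p ∈ pairSetCon)) : Nat) : Int),
         unv + ((l.countP (fun p => decide (p ∈ pairSetVow)) : Nat) : Int)) := by
  intro l
  induction l with
  | nil => intro phe unv; simp
  | cons p l ih =>
    intro phe unv
    rw [List.foldl_cons, List.countP_cons, List.countP_cons]
    have hc := mem_con p.1 p.2
    have hv := mem_vow p.1 p.2
    simp only [stepEqZ]
    by_cases hne : p.1 = p.2
    · have h1 : (p.1, p.2) ∉ pairSetCon := by rw [hne]; exact not_self_con p.2
      have h2 : (p.1, p.2) ∉ pairSetVow := by rw [hne]; exact not_self_vow p.2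
      rw [if_neg (by simp [hne])]
      rw [ih]
      simp [h1, h2]
    · rw [if_pos hne]
      by_cases h1 : p.2 ∈ simCon p.1
      · have h1' : (p.1, p.2) ∈ pairSetCon := hc.mp h1
        have h2' : (p.1, p.2) ∉ pairSetVow := by
          intro hv'
          have := (mem_vow p.1 p.2).mpr hv'
          unfold simCon at h1; unfold simVow at this
          split_ifs at h1 <;> simp_all
        rw [if_pos h1, ih]
        simp [h1', h2']
        omega
      · have h1' : (p.1, p.2) ∉ pairSetCon := fun hx => h1 (hc.mpr hx)
        rw [if_neg h1]
        by_cases h2 : p.2 ∈ simVow p.1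
        · have h2' : (p.1, p.2) ∈ pairSetVow := hv.mp h2
          rw [if_pos h2, ih]
          simp [h1', h2']
          omega
        · have h2' : (p.1, p.2) ∉ pairSetVow := fun hx => h2 (hv.mpr hx)
          rw [if_neg h2, ih]
          simp [h1', h2']
  -- end eq_split

-- prev_c after processing pairs[:c], starting from pr
def prevAt (l : List (Char × Char)) (pr : Option Char) (c : Nat) : Option Char :=
  (((l.take c).reverse.find? (fun p => p.1 == p.2)).map Prod.fst).or pr

theorem prevAt_zero (l : List (Char × Char)) (pr : Option Char) : prevAt l pr 0 = pr := by
  simp [prevAt]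

theorem prevAt_succ (p : Char × Char) (l : List (Char × Char)) (pr : Option Char) (c : Nat) :
    prevAt (p :: l) pr (c + 1) = prevAt l (if p.1 = p.2 then some p.1 else pr) c := by
  unfold prevAt
  rw [List.take_succ_cons, List.reverse_cons, List.find?_append]
  by_cases h : p.1 = p.2
  · have h1 : List.find? (fun p => p.1 == p.2) [p] = some p := by simp [List.find?, h]
    rw [h1, if_pos h]
    cases hfind : List.find? (fun p => p.1 == p.2) (l.take c).reverse <;> simp
  · have hb : (p.1 == p.2) = false := by simp [h]
    have h1 : List.find? (fun p => p.1 == p.2) [p] = none := by simp [List.find?, hb]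
    rw [h1, if_neg h]
    cases hfind : List.find? (fun p => p.1 == p.2) (l.take c).reverse <;> simp

theorem prevAt_none (l : List (Char × Char)) (c : Nat) : prevAt l none c = prevMatch l c := by
  simp [prevAt, prevMatch]

-- the doc fold equals the stateless per-position backward-search count
theorem doc_count : ∀ (l : List (Char × Char)) (d : Int) (pr : Option Char),
    (l.foldl stepDoc (d, pr)).1
      = d + (((List.range l.length).countP (fun c =>
          let p := l.getD c (' ', ' ')
          decide (p.1 ≠ p.2 ∧ p.2 ∈ consonantsL ∧ prevAt l pr c = some p.2)) : Nat) : Int) := by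
  intro l
  induction l with
  | nil => intro d pr; simp
  | cons p l ih =>
    intro d pr
    rw [List.foldl_cons, List.length_cons, List.range_succ_eq_map, List.countP_cons,
      List.countP_map]
    have h0 : prevAt (p :: l) pr 0 = pr := prevAt_zero _ _
    have hshift : ((List.range l.length).countP
        ((fun c => let q := (p :: l).getD c (' ', ' ')
          decide (q.1 ≠ q.2 ∧ q.2 ∈ consonantsL ∧ prevAt (p :: l) pr c = some q.2)) ∘ (· + 1)))
        = (List.range l.length).countP (fun c =>
          let q := l.getD c (' ', ' ')
          decide (q.1 ≠ q.2 ∧ q.2 ∈ consonantsL ∧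
            prevAt l (if p.1 = p.2 then some p.1 else pr) c = some q.2)) := by
      apply List.countP_congr
      intro c _
      simp only [Function.comp_apply, List.getD_cons_succ, prevAt_succ]
    rw [hshift]
    simp only [stepDoc]
    by_cases c1 : p.1 ≠ p.2 ∧ some p.2 = pr ∧ p.2 ∈ consonantsL
    · rw [if_pos c1, ih]
      have hifpr : (if p.1 = p.2 then some p.1 else pr) = pr := if_neg c1.1
      rw [hifpr]
      have : (let q := (p :: l).getD 0 (' ', ' ')
          decide (q.1 ≠ q.2 ∧ q.2 ∈ consonantsL ∧ prevAt (p :: l) pr 0 = some q.2)) = true := by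
        simp only [List.getD_cons_zero, h0]
        exact decide_eq_true ⟨c1.1, c1.2.2, c1.2.1.symm⟩
      rw [this]
      simp
      omega
    · rw [if_neg c1]
      have hfalse : (let q := (p :: l).getD 0 (' ', ' ')
          decide (q.1 ≠ q.2 ∧ q.2 ∈ consonantsL ∧ prevAt (p :: l) pr 0 = some q.2)) = false := by
        simp only [List.getD_cons_zero, h0, decide_eq_false_iff_not]
        intro ⟨ha, hb, hcx⟩
        exact c1 ⟨ha, hcx.symm, hb⟩
      rw [hfalse]
      by_cases c2 : p.1 = p.2
      · rw [if_pos c2, ih]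
        simp only [if_pos c2]
        simp
      · rw [if_neg c2, ih]
        simp only [if_neg c2]
        simp

-- ===== VERDICT (by name: the statement is the Claim_ definition above) =====
theorem sim_characters_spec : Claim_equal_sim_characters := by
  intro src tgt _ _
  unfold Spec_sim_characters sim_characters sim_characters_alt
  by_cases h : src.toList.length = tgt.toList.length
  · simp only [if_pos h]
    rw [eq_loop _ _ (le_of_eq h), eq_split]
    simp
  · simp only [if_neg h]
    by_cases h2 : src.toList.length < tgt.toList.length
    · simp only [if_pos h2]
      obtain ⟨k, hm⟩ : ∃ k, tgt.toList.length = src.toList.length + k + 1 :=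
        ⟨tgt.toList.length - src.toList.length - 1, by omega⟩
      have h1 : List.range tgt.toList.length
          = List.range (src.toList.length + k) ++ [src.toList.length + k] := by
        rw [hm]; exact List.range_succ
      rw [h1, List.range_add, List.foldl_append, List.foldl_append, List.foldl_map]
      -- prefix: stepA2 behaves as stepAIn there
      have e1 : List.foldl (stepA2 src tgt) ((0:Int), (0:Int), (0:Int), (none : Option Char))
            (List.range src.toList.length)
          = List.foldl (stepAIn src.toList tgt.toList) (0, 0, 0, none)
            (List.range src.toList.length) :=
        PySem.List.foldl_congr_mem _ _ _ _ (by
          intro acc x hx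
          simp only [List.mem_range] at hx
          have hx2 : ¬ x = tgt.toList.length - 1 := by omega
          simp only [stepA2]
          rw [if_neg hx2, if_pos hx])
      rw [e1, in_loop _ _ (le_of_lt h2), split_prefix]
      -- middle: stepA2 is the identity there
      have e2 : ∀ st : Int × Int × Int × Option Char,
          List.foldl (fun x y => stepA2 src tgt x (src.toList.length + y)) st (List.range k) = st := by
        intro st
        exact (PySem.List.foldl_congr_mem _ _ (fun acc _ => acc) _ (by
          intro acc x hx
          simp only [List.mem_range] at hx
          have hx2 : ¬ src.toList.length + x = tgt.toList.length - 1 := by omega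
          have hx3 : ¬ src.toList.length + x < src.toList.length := by omega
          simp only [stepA2]
          rw [if_neg hx2, if_neg hx3])).trans (List.foldl_fixed _)
      rw [e2]
      -- last index: only the aee check fires
      have hc1 : src.toList.length + k = tgt.toList.length - 1 := by omega
      have hc2 : ¬ (src.toList.length + k < src.toList.length) := by omega
      simp only [List.foldl_cons, List.foldl_nil, stepA2, if_pos hc1, if_neg hc2]
      -- assemble components
      have hphe : (src.toList.zip tgt.toList).countP (fun p => decide (p.2 ∈ simCon p.1))
          = (src.toList.zip tgt.toList).countP (fun p => decide (p ∈ pairSetCon)) :=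
        List.countP_congr (fun p _ => by
          simp only [decide_eq_true_eq]
          exact (mem_con p.1 p.2).trans (by rw [Prod.mk.eta]))
      have hdoc2 : (List.foldl stepDoc (0, none) (src.toList.zip tgt.toList)).1
          = (((List.range (src.toList.zip tgt.toList).length).countP (fun c =>
              let p := (src.toList.zip tgt.toList).getD c (' ', ' ')
              decide (p.1 ≠ p.2 ∧ p.2 ∈ consonantsL ∧
                prevMatch (src.toList.zip tgt.toList) c = some p.2)) : Nat) : Int) := by
        rw [doc_count, zero_add]
        congr 2
        funext c
        simp only [prevAt_none]
      split_ifs with hae <;> rw [hphe, hdoc2] <;> simp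
    · simp only [if_neg h2]
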